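-- pv_equiv track=rewrite | github.com/SHADE-AI/daidepp | daidepp/parser/grammar.py | _create_grammar_str_from_dict
-- ===== SOURCE A (Python) =====
-- from typing import Dict, List, Set, Tuple
--
-- GRAMMAR_DICT = Dict[str, str]
--
-- def _create_grammar_str_from_dict(
--     grammar: GRAMMAR_DICT, allow_just_arrangement: bool = False
-- ) -> str:
--     grammar_str = ""
--     for item in grammar.items():
--         # message needs to be the first rule in the string, per parsimonious rules:
--         # "The first rule is taken to be the default start symbol, but you can override that."
--         # https://github.com/erikrose/parsimonious#example-usage
--         if item[0] == "message":
--             left = item[0]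
--             right = item[1]
--             if allow_just_arrangement:
--                 right += " / arrangement"
--             grammar_str = f"{left} = {right}\n" + grammar_str
--
--         else:
--             grammar_str += f"{item[0]} = {item[1]}\n"
--     return grammar_str
-- ===== SOURCE B (Python) =====
-- def _create_grammar_str_from_dict(grammar, allow_just_arrangement=False):
--     # Stable sort: the boolean key moves the "message" rule to the front while
--     # keeping every other rule in insertion order; then one uniform join pass.
--     ordered = sorted(grammar.items(), key=lambda kv: kv[0] != "message")
--     lines = []
--     for k, v in ordered:
--         if k == "message" and allow_just_arrangement:
--             v += " / arrangement"
--         lines.append(f"{k} = {v}\n")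
--     return "".join(lines)
-- ===== Notes on version B (the rewrite author's own statement) =====
-- stated objective: alternative
-- what changed: B replaces A's in-loop prepend-on-message accumulator with a stable sort by the boolean key (k != 'message') that moves the message rule to the front, followed by one uniform join pass over the ordered items; Pre_ only excludes assoc lists with a duplicate 'message' key, which no Python dict input can produce.
import Mathlib
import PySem

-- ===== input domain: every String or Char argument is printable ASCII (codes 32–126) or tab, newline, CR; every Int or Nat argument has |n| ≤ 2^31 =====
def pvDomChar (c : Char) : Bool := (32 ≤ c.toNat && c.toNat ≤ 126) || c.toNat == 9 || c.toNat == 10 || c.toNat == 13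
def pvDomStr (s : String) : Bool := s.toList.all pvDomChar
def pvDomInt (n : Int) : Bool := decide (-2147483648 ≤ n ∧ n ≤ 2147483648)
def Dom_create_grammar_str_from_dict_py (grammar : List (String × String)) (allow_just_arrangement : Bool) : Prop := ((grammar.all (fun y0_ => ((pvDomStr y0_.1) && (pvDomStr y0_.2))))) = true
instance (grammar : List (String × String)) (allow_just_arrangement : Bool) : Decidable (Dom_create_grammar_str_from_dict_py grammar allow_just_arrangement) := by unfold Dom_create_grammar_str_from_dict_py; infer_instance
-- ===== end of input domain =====

-- B replaces A's in-loop prepend-on-message accumulator with a stable sort by the boolean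
-- key (k != "message") followed by one uniform join pass; objective: alternative.
-- Equivalence is about the return value (neither version mutates its argument).

-- ===== PORT A =====
-- literal transliteration of A's accumulator loop (prepend on "message", append otherwise)
def create_grammar_str_from_dict_py (grammar : List (String × String)) (allow_just_arrangement : Bool) : String :=
  grammar.foldl (fun grammar_str item =>
    if item.1 == "message" then
      let left := item.1
      let right := item.2
      let right := if allow_just_arrangement then right ++ " / arrangement" else right
      (left ++ " = " ++ right ++ "\n") ++ grammar_str
    else
      grammar_str ++ (item.1 ++ " = " ++ item.2 ++ "\n")) ""

-- ===== PORT B =====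
-- transliteration of Source B: stable sort by the boolean key kv[0] != "message"
-- (sorted → PySem.List.sorted), then the line-building loop (list append → foldl with
-- singleton append), then "".join(lines) (→ String.join)
def create_grammar_str_from_dict_py_alt (grammar : List (String × String)) (allow_just_arrangement : Bool) : String :=
  let ordered := PySem.List.sorted grammar (fun kv => kv.1 != "message") false
  let lines := ordered.foldl (fun lines kv =>
    let v := if kv.1 == "message" && allow_just_arrangement then kv.2 ++ " / arrangement" else kv.2
    lines ++ [kv.1 ++ " = " ++ v ++ "\n"]) []
  String.join lines

-- ===== PRECONDITION & SPEC =====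
-- Pre_ excludes assoc lists carrying the key "message" more than once: a Python dict cannot
-- contain a duplicate key, so no Python input A returns on is excluded.
def Pre_create_grammar_str_from_dict_py (grammar : List (String × String)) (allow_just_arrangement : Bool) : Prop :=
  (grammar.map Prod.fst).count "message" ≤ 1
instance (grammar : List (String × String)) (allow_just_arrangement : Bool) : Decidable (Pre_create_grammar_str_from_dict_py grammar allow_just_arrangement) := by unfold Pre_create_grammar_str_from_dict_py; infer_instance
def pvWitness_create_grammar_str_from_dict_py : (List (String × String)) × Bool :=
  ([("turn", "season year"), ("message", "press / response"), ("season", "'SPR' / 'FAL'")], true)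

def Spec_create_grammar_str_from_dict_py (grammar : List (String × String)) (allow_just_arrangement : Bool) (out : String) : Prop := out = create_grammar_str_from_dict_py_alt grammar allow_just_arrangement
instance (grammar : List (String × String)) (allow_just_arrangement : Bool) (out : String) : Decidable (Spec_create_grammar_str_from_dict_py grammar allow_just_arrangement out) := by unfold Spec_create_grammar_str_from_dict_py; infer_instance

-- ===== CLAIM (what is proved, stated in full; the proofs are below) =====
def Claim_equal_create_grammar_str_from_dict_py : Prop := ∀ (grammar : List (String × String)) (allow_just_arrangement : Bool), Dom_create_grammar_str_from_dict_py grammar allow_just_arrangement → Pre_create_grammar_str_from_dict_py grammar allow_just_arrangement → Spec_create_grammar_str_from_dict_py grammar allow_just_arrangement (create_grammar_str_from_dict_py grammar allow_just_arrangement)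

-- ===== LEMMAS AND PROOFS =====

-- the sort key of B
def pvKey (p : String × String) : Bool := p.1 != "message"

-- the line B emits for an item
def pvLine (allow : Bool) (p : String × String) : String :=
  p.1 ++ " = " ++ (if p.1 == "message" && allow then p.2 ++ " / arrangement" else p.2) ++ "\n"

-- A's loop body, abstracted
def pvStep (allow : Bool) (grammar_str : String) (item : String × String) : String :=
  if item.1 == "message" then
    (item.1 ++ " = " ++ (if allow then item.2 ++ " / arrangement" else item.2) ++ "\n") ++ grammar_str
  else
    grammar_str ++ (item.1 ++ " = " ++ item.2 ++ "\n")

theorem pvA_eq_foldl_step (grammar : List (String × String)) (allow : Bool) :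
    create_grammar_str_from_dict_py grammar allow = grammar.foldl (pvStep allow) "" := rfl

theorem pvJoin_cons (a : String) (l : List String) : String.join (a :: l) = a ++ String.join l := by
  simp [String.join]
  induction l generalizing a with
  | nil => simp
  | cons b t ih => simp [List.foldl_cons]; rw [ih (a ++ b), ih b, ← String.append_assoc]

theorem pvJoin_append (l m : List String) :
    String.join (l ++ m) = String.join l ++ String.join m := by
  induction l with
  | nil => simp [String.join]
  | cons a t ih => rw [List.cons_append, pvJoin_cons, pvJoin_cons, ih, String.append_assoc]

-- STABILITY of PySem's insertion sort for the two-valued key pvKey: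
-- inserting a "message" item goes past all other "message" items and before everything else
theorem pvInsert_msg (x : String × String) (hx : pvKey x = false)
    (A B : List (String × String)) (hA : ∀ a ∈ A, pvKey a = false) (hB : ∀ b ∈ B, pvKey b = true) :
    PySem.List.insertBy (fun a b => decide (pvKey a < pvKey b)) x (A ++ B) = A ++ x :: B := by
  induction A with
  | nil =>
      cases B with
      | nil => rfl
      | cons b t =>
          have hb := hB b (List.mem_cons_self ..)
          simp [PySem.List.insertBy, hx, hb]
  | cons a t ih =>
      have ha := hA a (List.mem_cons_self ..)
      simp only [List.cons_append, PySem.List.insertBy, hx, ha]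
      simp [ih (fun q hq => hA q (List.mem_cons_of_mem _ hq))]

-- inserting a non-"message" item goes to the very end (its key is maximal)
theorem pvInsert_other (x : String × String) (hx : pvKey x = true) (l : List (String × String)) :
    PySem.List.insertBy (fun a b => decide (pvKey a < pvKey b)) x l = l ++ [x] := by
  induction l with
  | nil => rfl
  | cons y t ih =>
      have : decide (pvKey x < pvKey y) = false := by cases hk : pvKey y <;> simp [hx, hk]
      simp [PySem.List.insertBy, this, ih]

-- hence B's stable sort is exactly: the "message" items first, then the rest, each in order
theorem pvSorted_eq_partition (l : List (String × String)) :
    PySem.List.sorted l pvKey false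
      = l.filter (fun p => pvKey p = false) ++ l.filter (fun p => pvKey p = true) := by
  suffices h : ∀ (A B : List (String × String)), (∀ a ∈ A, pvKey a = false) → (∀ b ∈ B, pvKey b = true) →
      l.foldl (fun acc x => PySem.List.insertBy (fun a b => decide (pvKey a < pvKey b)) x acc) (A ++ B)
        = (A ++ l.filter (fun p => pvKey p = false)) ++ (B ++ l.filter (fun p => pvKey p = true)) by
    have := h [] [] (by simp) (by simp)
    simpa [PySem.List.sorted] using this
  induction l with
  | nil => intro A B _ _; simp
  | cons x t ih =>
      intro A B hA hB
      rw [List.foldl_cons]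
      cases hx : pvKey x with
      | false =>
          rw [pvInsert_msg x hx A B hA hB, show A ++ x :: B = (A ++ [x]) ++ B by simp]
          rw [ih (A ++ [x]) B (by intro a ha; rcases List.mem_append.mp ha with h | h
                                  · exact hA a h
                                  · simpa [List.eq_of_mem_singleton h] using hx) hB]
          simp [hx]
      | true =>
          rw [pvInsert_other x hx, List.append_assoc, ih A (B ++ [x]) hA
            (by intro b hb; rcases List.mem_append.mp hb with h | h
                · exact hB b h
                · simpa [List.eq_of_mem_singleton h] using hx)]
          simp [hx]

-- B computed through the partition: join of message lines, then join of the other lines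
theorem pvAlt_eq (grammar : List (String × String)) (allow : Bool) :
    create_grammar_str_from_dict_py_alt grammar allow
      = String.join ((grammar.filter (fun p => pvKey p = false)).map (pvLine allow))
        ++ String.join ((grammar.filter (fun p => pvKey p = true)).map (pvLine allow)) := by
  show String.join ((PySem.List.sorted grammar pvKey false).foldl
      (fun lines kv => lines ++ [pvLine allow kv]) []) = _
  rw [PySem.List.foldl_append_singleton_eq_map, pvSorted_eq_partition, List.map_append,
    List.nil_append, pvJoin_append]

-- when no item of l has key "message", A's loop just appends all (non-message) lines
theorem pvLoop_no_msg (allow : Bool) (l : List (String × String))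
    (h : ∀ p ∈ l, p.1 ≠ "message") (s : String) :
    l.foldl (pvStep allow) s = s ++ String.join ((l.filter (fun p => pvKey p = true)).map (pvLine allow)) := by
  induction l generalizing s with
  | nil => simp [String.join]
  | cons p t ih =>
      have hp : p.1 ≠ "message" := h p (List.mem_cons_self ..)
      rw [List.foldl_cons, show pvStep allow s p = s ++ (p.1 ++ " = " ++ p.2 ++ "\n") by
        simp [pvStep, hp]]
      rw [ih (fun q hq => h q (List.mem_cons_of_mem _ hq))]
      simp [pvKey, hp, pvJoin_cons, pvLine, String.append_assoc]

-- main invariant: with at most one "message" key, A's loop started from accumulator s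
-- yields the message lines, then s, then the remaining lines
theorem pvLoop_main (allow : Bool) (l : List (String × String))
    (h : (l.map Prod.fst).count "message" ≤ 1) (s : String) :
    l.foldl (pvStep allow) s
      = String.join ((l.filter (fun p => pvKey p = false)).map (pvLine allow))
        ++ s ++ String.join ((l.filter (fun p => pvKey p = true)).map (pvLine allow)) := by
  induction l generalizing s with
  | nil => simp [String.join]
  | cons p t ih =>
      obtain ⟨k, v⟩ := p
      rw [List.foldl_cons]
      by_cases hp : k = "message"
      · have hcnt : "message" ∉ t.map Prod.fst := by
          simp [hp] at h
          exact List.count_eq_zero.mp (by omega)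
        have hno : ∀ q ∈ t, q.1 ≠ "message" := fun q hq hq1 =>
          hcnt (hq1 ▸ List.mem_map_of_mem hq)
        rw [show pvStep allow s (k, v)
            = (k ++ " = " ++ (if allow then v ++ " / arrangement" else v) ++ "\n") ++ s by
          simp [pvStep, hp]]
        have hfilt2 : t.filter (fun p => decide (p.1 = "message")) = [] := by
          rw [List.filter_eq_nil_iff]
          intro q hq
          simp [hno q hq]
        rw [pvLoop_no_msg allow t hno]
        simp [pvKey, hp, hfilt2, pvJoin_cons, pvLine, String.append_assoc]
        simp [String.join]
      · have ht : (t.map Prod.fst).count "message" ≤ 1 := by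
          simp [hp] at h ⊢
          omega
        rw [show pvStep allow s (k, v) = s ++ (k ++ " = " ++ v ++ "\n") by simp [pvStep, hp]]
        rw [ih ht]
        simp [pvKey, hp, pvJoin_cons, pvLine, String.append_assoc]

-- ===== VERDICT (by name: the statement is the Claim_ definition above) =====
theorem create_grammar_str_from_dict_py_spec : Claim_equal_create_grammar_str_from_dict_py := by
  intro grammar allow _ hpre
  unfold Spec_create_grammar_str_from_dict_py
  rw [pvA_eq_foldl_step, pvAlt_eq, pvLoop_main allow grammar hpre, String.append_empty]
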